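-- pv_equiv track=rewrite | github.com/danielmiller57910/udacity-ai-intro | solution.py | find_unique_twins
-- ===== SOURCE A (Python) =====
-- def find_unique_twins(possible_twins: dict) -> list:
--     actual_twins = []
--     for k, v in possible_twins.items():
--         twin = dict(filter(lambda item: item[1] == v, possible_twins.items()))
--         if len(twin.values()) == 2:
--             twin = {"node_1": list(twin.keys())[0], "node_2": list(twin.keys())[-1], "value": list(twin.values())[0]}
--             actual_twins.append(twin)
--     return list({x['node_1']:x for x in actual_twins}.values())
-- ===== SOURCE B (Python) =====
-- def find_unique_twins(possible_twins: dict) -> list: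
--     groups = {}
--     for k, v in possible_twins.items():
--         groups.setdefault(v, []).append(k)
--     return [{"node_1": ks[0], "node_2": ks[1], "value": v}
--             for v, ks in groups.items() if len(ks) == 2]
-- ===== Notes on version B (the rewrite author's own statement) =====
-- stated objective: faster
-- what changed: B makes one pass grouping keys by value in a dictionary and emits a twin per value group of exactly two keys, instead of A's re-filtering of the whole dict for every key followed by a dedup-by-node_1 pass.
import Mathlib
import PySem

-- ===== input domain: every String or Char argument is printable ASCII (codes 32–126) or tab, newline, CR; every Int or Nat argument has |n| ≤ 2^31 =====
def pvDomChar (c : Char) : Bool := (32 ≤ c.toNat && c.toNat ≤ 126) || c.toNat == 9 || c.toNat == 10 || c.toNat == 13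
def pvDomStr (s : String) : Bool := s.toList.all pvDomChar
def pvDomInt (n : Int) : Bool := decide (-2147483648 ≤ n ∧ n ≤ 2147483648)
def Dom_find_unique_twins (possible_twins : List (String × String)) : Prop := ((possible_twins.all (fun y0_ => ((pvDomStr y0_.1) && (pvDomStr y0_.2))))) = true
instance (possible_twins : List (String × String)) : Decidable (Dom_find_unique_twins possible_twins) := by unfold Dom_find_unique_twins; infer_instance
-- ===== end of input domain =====

-- B groups the keys by value with one dictionary pass and emits a twin per value group of
-- exactly two keys, replacing A's quadratic re-filtering per key plus final dedup (O(n^2) → O(n)).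

-- ===== PORT A =====
def find_unique_twins (possible_twins : List (String × String)) : List (List (String × String)) :=
  let actual_twins := possible_twins.foldl (fun acc kv =>
    let twin := PySem.Dict.ofList (possible_twins.filter (fun item => item.2 == kv.2))
    if twin.values.length = 2 then
      acc ++ [[("node_1", PySem.List.pyGetD twin.keys 0 ""),
               ("node_2", PySem.List.pyGetD twin.keys (-1) ""),
               ("value", PySem.List.pyGetD twin.values 0 "")]]
    else acc) []
  (actual_twins.foldl
    (fun d x => d.insert (PySem.Dict.getD (PySem.Dict.mk x) "node_1" "") x)
    PySem.Dict.empty).values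

-- ===== PORT B =====
def find_unique_twins_alt (possible_twins : List (String × String)) : List (List (String × String)) :=
  let groups : PySem.Dict String (List String) :=
    possible_twins.foldl (fun d p => d.modify p.2 [] (fun ks => ks ++ [p.1])) PySem.Dict.empty
  groups.items.foldl (fun acc p =>
    if p.2.length = 2 then
      acc ++ [[("node_1", PySem.List.pyGetD p.2 0 ""),
               ("node_2", PySem.List.pyGetD p.2 1 ""),
               ("value", p.1)]]
    else acc) []

-- ===== PRECONDITION & SPEC =====
-- A's parameter is a Python dict, so its keys are necessarily distinct; an association list
-- with duplicate keys represents no dict, and Pre_ excludes exactly those lists.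
def Pre_find_unique_twins (possible_twins : List (String × String)) : Prop :=
  (possible_twins.map (fun p => p.1)).Nodup
instance (possible_twins : List (String × String)) : Decidable (Pre_find_unique_twins possible_twins) := by unfold Pre_find_unique_twins; infer_instance
def pvWitness_find_unique_twins : (List (String × String)) := [("a", "x"), ("b", "x"), ("c", "y")]
def Spec_find_unique_twins (possible_twins : List (String × String)) (out : List (List (String × String))) : Prop := out = find_unique_twins_alt possible_twins
instance (possible_twins : List (String × String)) (out : List (List (String × String))) : Decidable (Spec_find_unique_twins possible_twins out) := by unfold Spec_find_unique_twins; infer_instance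

-- ===== CLAIM (what is proved, stated in full; the proofs are below) =====
def Claim_equal_find_unique_twins : Prop := ∀ (possible_twins : List (String × String)), Dom_find_unique_twins possible_twins → Pre_find_unique_twins possible_twins → Spec_find_unique_twins possible_twins (find_unique_twins possible_twins)

-- ===== LEMMAS AND PROOFS =====

-- values of the input, in order
def pvVals (l : List (String × String)) : List String := l.map (fun p => p.2)
-- keys whose value is v, in order
def pvKs (l : List (String × String)) (v : String) : List String :=
  (l.filter (fun p => p.2 == v)).map (fun p => p.1)
-- the twin record for value v
def pvT (l : List (String × String)) (v : String) : List (String × String) :=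
  [("node_1", (pvKs l v).getD 0 ""), ("node_2", (pvKs l v).getD 1 ""), ("value", v)]
-- optional twin for value v
def pvF (l : List (String × String)) (v : String) : Option (List (String × String)) :=
  if (pvKs l v).length = 2 then some (pvT l v) else none
-- the key A's final dedup dict uses
def pvKey (x : List (String × String)) : String := PySem.Dict.getD (PySem.Dict.mk x) "node_1" ""

lemma foldl_emit {α β : Type} (G : α → Option β) (f : List β → α → List β)
    (hf : ∀ acc x, f acc x = acc ++ (G x).toList) :
    ∀ (l : List α) (acc : List β), l.foldl f acc = acc ++ l.filterMap G := by
  intro l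
  induction l with
  | nil => intro acc; simp
  | cons x xs ih =>
      intro acc
      rw [List.foldl_cons, hf, ih, List.filterMap_cons]
      cases G x <;> simp

lemma ofList_items_of_nodup (g : List (String × String))
    (h : (g.map (fun p => p.1)).Nodup) : (PySem.Dict.ofList g).items = g := by
  have := PySem.Dict.items_foldl_insert_fresh g (fun p => p.1) (fun p => p.2) PySem.Dict.empty
      (fun a _ => PySem.Dict.contains_empty _) h
  simpa [PySem.Dict.ofList, PySem.Dict.update, PySem.Dict.empty] using this

lemma pvKey_pvT (l : List (String × String)) (v : String) :
    pvKey (pvT l v) = (pvKs l v).getD 0 "" := by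
  simp [pvKey, pvT, PySem.Dict.getD_eq_get?_getD, PySem.Dict.get?_mk_cons]

-- with distinct keys, the twin (when any) determines its value and vice versa
lemma filt2 (l : List (String × String)) (v : String) (h : (pvKs l v).length = 2) :
    ∃ p q, l.filter (fun it => it.2 == v) = [p, q] ∧ p.2 = v ∧ p ∈ l := by
  have hlen : (l.filter (fun it => it.2 == v)).length = 2 := by
    simpa [pvKs] using h
  obtain ⟨p, q, hpq⟩ := List.length_eq_two.mp hlen
  refine ⟨p, q, hpq, ?_, ?_⟩
  · have hp : p ∈ l.filter (fun it => it.2 == v) := by simp [hpq]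
    have := List.mem_filter.mp hp
    exact beq_iff_eq.mp this.2
  · exact List.mem_of_mem_filter (show p ∈ l.filter (fun it => it.2 == v) by simp [hpq])

lemma pvF_inj (l : List (String × String)) (hnd : (l.map (fun p => p.1)).Nodup)
    {v w : String} {t t' : List (String × String)}
    (hv : pvF l v = some t) (hw : pvF l w = some t') (hk : pvKey t = pvKey t') :
    v = w ∧ t = t' := by
  unfold pvF at hv hw
  split_ifs at hv hw with h1 h2
  obtain ⟨rfl⟩ : pvT l v = t := Option.some.inj hv
  obtain ⟨rfl⟩ : pvT l w = t' := Option.some.inj hw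
  rw [pvKey_pvT, pvKey_pvT] at hk
  obtain ⟨p, q, hpq, hpv, hpl⟩ := filt2 l v h1
  obtain ⟨p', q', hpq', hpv', hpl'⟩ := filt2 l w h2
  have hks : pvKs l v = [p.1, q.1] := by simp [pvKs, hpq]
  have hks' : pvKs l w = [p'.1, q'.1] := by simp [pvKs, hpq']
  rw [hks, hks'] at hk
  simp only [List.getD_cons_zero] at hk
  have hinj := (List.nodup_map_iff_inj_on (List.Nodup.of_map _ hnd)).mp hnd
  have hpp : p = p' := hinj p hpl p' hpl' hk
  have hvw : v = w := by rw [← hpv, ← hpv', hpp]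
  exact ⟨hvw, by rw [hvw]⟩

-- A's dedup loop keeps exactly the first occurrence of each twin
lemma dedup_loop (l : List (String × String)) (hnd : (l.map (fun p => p.1)).Nodup) :
    ∀ (rest seen : List String) (d : PySem.Dict String (List (String × String))),
      d.items = ((PySem.List.dedup seen).filterMap (pvF l)).map (fun t => (pvKey t, t)) →
      ((rest.filterMap (pvF l)).foldl (fun d x => d.insert (pvKey x) x) d).items
        = ((PySem.List.dedup (seen ++ rest)).filterMap (pvF l)).map (fun t => (pvKey t, t)) := by
  intro rest
  induction rest with
  | nil => intro seen d h; simpa using h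
  | cons v rest ih =>
    intro seen d h
    have hseen : seen ++ v :: rest = (seen ++ [v]) ++ rest := by simp
    rw [hseen]
    have hadd : PySem.List.dedup (seen ++ [v]) = PySem.Set.add (PySem.List.dedup seen) v := by
      simp [PySem.List.dedup, PySem.Set.ofList_append, PySem.Set.update_cons,
        PySem.Set.update_nil]
    have hcmem : ∀ s : List String, v ∈ s → PySem.Set.contains s v = true := by
      intro s hs; simpa [PySem.Set.contains] using hs
    cases hF : pvF l v with
    | none =>
      rw [List.filterMap_cons_none hF]
      apply ih (seen ++ [v]) d
      rw [hadd]
      unfold PySem.Set.add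
      split_ifs with hc
      · exact h
      · rw [List.filterMap_append]; simp [hF, h]
    | some t =>
      rw [List.filterMap_cons_some hF, List.foldl_cons]
      by_cases hmem : v ∈ PySem.List.dedup seen
      · -- the twin is already stored under its key; the insert changes nothing
        have htmem : t ∈ (PySem.List.dedup seen).filterMap (pvF l) :=
          List.mem_filterMap.mpr ⟨v, hmem, hF⟩
        have hpair : (pvKey t, t) ∈ d.items := by
          rw [h]; exact List.mem_map_of_mem htmem
        have hcont : d.contains (pvKey t) = true :=
          (PySem.Dict.contains_iff_mem_keys d _).mpr
            (by simp only [PySem.Dict.keys]; exact List.mem_map_of_mem hpair)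
        have hins : (d.insert (pvKey t) t).items = d.items := by
          rw [PySem.Dict.items_insert_of_contains d t hcont]
          have hpt : ∀ p ∈ d.items,
              (if (p.1 == pvKey t) = true then (pvKey t, t) else p) = p := by
            intro p hp
            rw [h] at hp
            obtain ⟨t', ht', rfl⟩ := List.mem_map.mp hp
            obtain ⟨w, hw, hFw⟩ := List.mem_filterMap.mp ht'
            split_ifs with he
            · have hkeq : pvKey t' = pvKey t := by simpa using he
              obtain ⟨-, ht⟩ := pvF_inj l hnd hFw hF hkeq
              rw [ht]
            · rfl
          rw [List.map_congr_left hpt]; simp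
        have hdeq : d.insert (pvKey t) t = d := PySem.Dict.ext hins
        rw [hdeq]
        apply ih (seen ++ [v]) d
        rw [hadd]
        unfold PySem.Set.add
        split_ifs with hc
        · exact h
        · exact absurd (hcmem _ hmem) hc
      · -- fresh key: the insert appends the new twin
        have hcont : d.contains (pvKey t) = false := by
          rw [← Bool.not_eq_true]
          intro hc
          have hk := (PySem.Dict.contains_iff_mem_keys d _).mp hc
          simp only [PySem.Dict.keys, h, List.map_map] at hk
          obtain ⟨t', ⟨w, hw, hFw⟩, hkeq⟩ :
              ∃ t', (∃ w ∈ seen, pvF l w = some t') ∧ pvKey t' = pvKey t := by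
            simpa [Function.comp_def] using hk
          obtain ⟨hvw, -⟩ := pvF_inj l hnd hFw hF hkeq
          exact hmem ((PySem.List.mem_dedup seen v).mpr (hvw ▸ hw))
        apply ih (seen ++ [v]) (d.insert (pvKey t) t)
        rw [PySem.Dict.items_insert_of_not_contains d t hcont, h, hadd]
        unfold PySem.Set.add
        split_ifs with hc
        · exact absurd hc (by
            intro hc'
            exact hmem (by simpa [PySem.Set.contains] using hc'))
        · rw [List.filterMap_append, List.map_append]
          simp [hF]

lemma emitA (l : List (String × String)) (hnd : (l.map (fun p => p.1)).Nodup) (v : String) :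
    (let twin := PySem.Dict.ofList (l.filter (fun item => item.2 == v))
     if twin.values.length = 2 then
       some [("node_1", PySem.List.pyGetD twin.keys 0 ""),
             ("node_2", PySem.List.pyGetD twin.keys (-1) ""),
             ("value", PySem.List.pyGetD twin.values 0 "")]
     else none) = pvF l v := by
  have hsub : ((l.filter (fun it => it.2 == v)).map (fun p => p.1)).Nodup :=
    ((List.filter_sublist (l := l) (p := fun it => it.2 == v)).map (fun p => p.1)).nodup hnd
  have hg := ofList_items_of_nodup _ hsub
  simp only [pvF]
  split_ifs with h1 h2 h2
  · -- both conditions hold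
    obtain ⟨p, q, hpq, hpv, _⟩ := filt2 l v h2
    rw [hpq]
    rw [hpq] at hg
    have hks : pvKs l v = [p.1, q.1] := by simp [pvKs, hpq]
    have e2 : PySem.List.pyGetD [p.1, q.1] (-1) "" = q.1 := by
      rw [show ([p.1, q.1] : List String) = [p.1] ++ [q.1] from rfl]
      exact PySem.List.pyGetD_neg_one_append_singleton _ _ _
    simp [pvT, PySem.Dict.values, PySem.Dict.keys, hg, hks, hpv,
      PySem.List.pyGetD_zero_cons, e2]
  · -- A's condition holds, pvF's fails: impossible
    exact absurd (by simpa [pvKs, PySem.Dict.values, hg] using h1) h2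
  · exact absurd (by simpa [pvKs, PySem.Dict.values, hg] using h2) h1
  · rfl

lemma A_eq (l : List (String × String)) (hnd : (l.map (fun p => p.1)).Nodup) :
    find_unique_twins l = (PySem.List.dedup (pvVals l)).filterMap (pvF l) := by
  unfold find_unique_twins
  have hbody : ∀ (acc : List (List (String × String))) (kv : String × String),
      (let twin := PySem.Dict.ofList (l.filter (fun item => item.2 == kv.2))
       if twin.values.length = 2 then
         acc ++ [[("node_1", PySem.List.pyGetD twin.keys 0 ""),
                  ("node_2", PySem.List.pyGetD twin.keys (-1) ""),
                  ("value", PySem.List.pyGetD twin.values 0 "")]]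
       else acc) = acc ++ ((pvF l kv.2).toList) := by
    intro acc kv
    rw [← emitA l hnd kv.2]
    simp only []
    split_ifs <;> simp
  rw [foldl_emit (fun kv => pvF l kv.2) _ hbody l []]
  have hfm : l.filterMap (fun kv => pvF l kv.2) = (pvVals l).filterMap (pvF l) := by
    simp [pvVals, List.filterMap_map]
  rw [List.nil_append, hfm]
  have hbase : (PySem.Dict.empty : PySem.Dict String (List (String × String))).items
      = ((PySem.List.dedup ([] : List String)).filterMap (pvF l)).map (fun t => (pvKey t, t)) := rfl
  have hloop := dedup_loop l hnd (pvVals l) [] PySem.Dict.empty hbase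
  simp only [pvKey] at hloop
  simp only [List.nil_append] at hloop
  simp only [PySem.Dict.values, hloop, List.map_map]
  simp [Function.comp_def]

lemma B_eq (l : List (String × String)) :
    find_unique_twins_alt l = (PySem.List.dedup (pvVals l)).filterMap (pvF l) := by
  unfold find_unique_twins_alt
  have hswap : l.foldl (fun d p => d.modify p.2 [] (fun ks => ks ++ [p.1])) PySem.Dict.empty
      = (l.map Prod.swap).foldl (fun d p => d.modify p.1 [] (fun ks => ks ++ [p.2]))
          PySem.Dict.empty := by
    rw [List.foldl_map]; simp
  rw [hswap]
  set gd := (l.map Prod.swap).foldl (fun d p => d.modify p.1 [] (fun ks => ks ++ [p.2]))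
      PySem.Dict.empty with hgd
  have hkeys : gd.keys = PySem.List.dedup (pvVals l) := by
    rw [hgd, PySem.Dict.keys_foldl_modify_key (l.map Prod.swap) Prod.fst []
      (fun d x ks => ks ++ [x.2]) PySem.Dict.empty]
    simp [PySem.Dict.keys_empty, PySem.Set.update_nil_left, PySem.List.dedup, pvVals,
      List.map_map, Function.comp_def, Prod.fst_swap]
  have hget : ∀ c, gd.getD c [] = pvKs l c := by
    intro c
    rw [hgd, PySem.Dict.getD_foldl_modify_append (l.map Prod.swap) PySem.Dict.empty c]
    simp [PySem.Dict.getD_empty, pvKs, List.filter_map, List.map_map, Function.comp_def,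
      Prod.fst_swap, Prod.snd_swap]
  have hnodup : gd.keys.Nodup := by
    rw [hgd]
    exact PySem.Dict.nodup_keys_foldl_modify_key (l.map Prod.swap) Prod.fst []
      (fun d x ks => ks ++ [x.2]) PySem.Dict.empty (by simp [PySem.Dict.keys_empty])
  have hitems : gd.items = (PySem.List.dedup (pvVals l)).map (fun v => (v, pvKs l v)) := by
    rw [PySem.Dict.items_eq_map_keys gd hnodup [], hkeys]
    exact List.map_congr_left (fun v _ => by rw [hget])
  simp only [hitems, List.foldl_map]
  rw [foldl_emit (pvF l) _ ?hf (PySem.List.dedup (pvVals l)) []]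
  · simp
  case hf =>
    intro acc v
    unfold pvF
    split_ifs with h
    · obtain ⟨a, b, hab⟩ := List.length_eq_two.mp h
      simp [hab, pvT, PySem.List.pyGetD]
    · simp

-- ===== VERDICT (by name: the statement is the Claim_ definition above) =====
theorem find_unique_twins_spec : Claim_equal_find_unique_twins := by
  intro l _ hpre
  unfold Spec_find_unique_twins
  rw [A_eq l hpre, B_eq l]
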